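-- pv_equiv track=rewrite | github.com/aaaasule/daily_code | 08/0801/换个思路来标注数据.py | tag_name
-- ===== SOURCE A (Python) =====
-- def tag_name(name):
--     name_list = []
--     len_name = len(name)
--     for i in range(0,len_name):
--         if i == 0:
--             taged_name = name[i] + '\tB-PER'
--             name_list.append(taged_name)
--         else:
--             taged_name = name[i] + '\tI-PER'
--             name_list.append(taged_name)
--     return name_list
-- ===== SOURCE B (Python) =====
-- def tag_name(name):
--     out = []
--     i = len(name) - 1
--     while i > 0:
--         out.append(name[i] + '\tI-PER')
--         i -= 1
--     if name:
--         out.append(name[0] + '\tB-PER')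
--     out.reverse()
--     return out
-- ===== Notes on version B (the rewrite author's own statement) =====
-- stated objective: alternative
-- what changed: Builds the output back-to-front: a descending while loop tags characters len-1..1 with I-PER, the B-PER head entry is appended outside the loop, and the list is reversed at the end, so the per-element i==0 branch disappears.
import Mathlib
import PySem

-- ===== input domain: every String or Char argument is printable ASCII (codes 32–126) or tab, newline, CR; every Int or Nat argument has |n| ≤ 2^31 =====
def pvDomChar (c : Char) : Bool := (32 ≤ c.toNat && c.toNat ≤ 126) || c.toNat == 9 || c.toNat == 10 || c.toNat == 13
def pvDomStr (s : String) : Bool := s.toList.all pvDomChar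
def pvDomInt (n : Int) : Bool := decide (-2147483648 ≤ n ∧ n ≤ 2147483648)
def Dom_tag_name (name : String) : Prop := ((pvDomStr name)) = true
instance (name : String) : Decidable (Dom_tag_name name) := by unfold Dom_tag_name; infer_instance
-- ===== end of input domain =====

-- B builds the output back-to-front (descending I-PER loop, B-PER appended last, final reverse), removing A's in-loop i==0 branch; objective: alternative.

-- ===== PORT A =====
-- name[i] is ported as pyGetD with a dummy default: i ∈ range(0, len(name)) is always in range, so this is exact.
def tag_name (name : String) : List String :=
  let len_name : Int := PySem.Str.len name
  (PySem.List.pyRange 0 len_name 1).foldl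
    (fun name_list i =>
      if i == 0 then
        name_list ++ [String.ofList (PySem.List.pyGetD name.toList i ' ' :: "\tB-PER".toList)]
      else
        name_list ++ [String.ofList (PySem.List.pyGetD name.toList i ' ' :: "\tI-PER".toList)])
    []

-- ===== PORT B =====
-- B's while loop 'while i > 0: append name[i]+I-PER; i -= 1', as structural recursion on the Nat index i.
-- name[i] for 1 ≤ i < len(name) is in range, so getD with a dummy default is exact.
def tagAltLoop (cs : List Char) : Nat → List String → List String
  | 0, out => out
  | i + 1, out =>
      tagAltLoop cs i (out ++ [String.ofList (cs.getD (i + 1) ' ' :: "\tI-PER".toList)])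

def tag_name_alt (name : String) : List String :=
  let cs := name.toList
  let out := tagAltLoop cs (cs.length - 1) []
  let out := if cs.isEmpty then out
             else out ++ [String.ofList (cs.headD ' ' :: "\tB-PER".toList)]
  out.reverse

-- ===== PRECONDITION & SPEC =====
def Spec_tag_name (name : String) (out : List String) : Prop := out = tag_name_alt name
instance (name : String) (out : List String) : Decidable (Spec_tag_name name out) := by unfold Spec_tag_name; infer_instance

-- ===== CLAIM (what is proved, stated in full; the proofs are below) =====
def Claim_equal_tag_name : Prop := ∀ (name : String), Dom_tag_name name → Spec_tag_name name (tag_name name)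

-- ===== LEMMAS AND PROOFS =====

-- A's loop, rephrased: a map over the index range, with name[k] resolved to the k-th character.
theorem tag_name_eq_map (name : String) :
    tag_name name =
      (List.range name.toList.length).map (fun k =>
        if k = 0 then
          String.ofList (name.toList.getD k ' ' :: "\tB-PER".toList)
        else
          String.ofList (name.toList.getD k ' ' :: "\tI-PER".toList)) := by
  unfold tag_name
  rw [show ((fun (name_list : List String) (i : Int) =>
      if i == 0 then
        name_list ++ [String.ofList (PySem.List.pyGetD name.toList i ' ' :: "\tB-PER".toList)]
      else
        name_list ++ [String.ofList (PySem.List.pyGetD name.toList i ' ' :: "\tI-PER".toList)]) =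
      fun name_list i => name_list ++ [if i == 0 then
        String.ofList (PySem.List.pyGetD name.toList i ' ' :: "\tB-PER".toList)
      else
        String.ofList (PySem.List.pyGetD name.toList i ' ' :: "\tI-PER".toList)]) from by
    funext nl i; split <;> rfl]
  rw [PySem.List.foldl_append_singleton_eq_map, PySem.List.pyRange_one, List.map_map]
  rw [show ((PySem.Str.len name - 0)).toNat = name.toList.length from by simp]
  apply List.map_congr_left
  intro k _
  simp only [Function.comp_apply, zero_add, beq_iff_eq, Nat.cast_eq_zero,
    PySem.List.pyGetD_natCast]

-- B's loop, unrolled: the accumulator is untouched, the produced suffix reversed is an ascending map.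
theorem tagAltLoop_eq (cs : List Char) (i : Nat) (out : List String) :
    tagAltLoop cs i out =
      out ++ ((List.range i).map
        (fun j => String.ofList (cs.getD (j + 1) ' ' :: "\tI-PER".toList))).reverse := by
  induction i generalizing out with
  | zero => simp [tagAltLoop]
  | succ i ih =>
      rw [tagAltLoop, ih, List.range_succ]
      simp

theorem tag_name_eq_alt (name : String) : tag_name name = tag_name_alt name := by
  rw [tag_name_eq_map]
  unfold tag_name_alt
  simp only [tagAltLoop_eq, List.nil_append]
  rcases h : name.toList with _ | ⟨c, cs⟩
  · simp
  · have hne : (c :: cs).isEmpty = false := rfl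
    simp only [hne, if_neg (Bool.false_ne_true), List.length_cons,
      Nat.add_sub_cancel, List.reverse_append, List.reverse_reverse,
      List.reverse_cons, List.reverse_nil, List.nil_append, List.headD_cons]
    rw [List.range_succ_eq_map, List.map_cons, List.map_map]
    simp only [List.getD_cons_zero, List.singleton_append, List.cons.injEq]
    constructor
    · rfl
    · apply List.map_congr_left
      intro j _
      simp [Function.comp]

-- ===== VERDICT (by name: the statement is the Claim_ definition above) =====
theorem tag_name_spec : Claim_equal_tag_name := by
  intro name _
  exact tag_name_eq_alt name
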